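-- pv_equiv track=rewrite | github.com/ScPlaceholder/SC-Toolbox-Beta-V2 | tools/Mining_Signals/ocr/screen_reader.py | _best_candidate
-- ===== SOURCE A (Python) =====
-- from typing import Optional
--
-- def _best_candidate(candidates: list[int]) -> Optional[int]:
--     """Pick the best candidate using frequency + length tiebreaker."""
--     if not candidates:
--         return None
--     from collections import Counter
--     counts = Counter(candidates).most_common()
--     top_count = counts[0][1]
--     tied = [val for val, cnt in counts if cnt == top_count]
--     return max(tied, key=lambda v: len(str(v)))
-- ===== SOURCE B (Python) =====
-- from typing import Optional
--
-- def _best_candidate(candidates: list[int]) -> Optional[int]: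
--     """Pick the best candidate using frequency + length tiebreaker."""
--     if not candidates:
--         return None
--     counts = {}
--     for v in candidates:
--         counts[v] = counts.get(v, 0) + 1
--     top = max(counts.values())
--     best = None
--     best_len = -1
--     for v in candidates:
--         if counts[v] == top and len(str(v)) > best_len:
--             best = v
--             best_len = len(str(v))
--     return best
-- ===== Notes on version B (the rewrite author's own statement) =====
-- stated objective: simpler
-- what changed: Replaces Counter + most_common (a full stable sort of the frequency table) and a separate tie-list + max() call with a plain counting dict, one max over the counts, and a single strict-improvement scan of the original list that merges tie collection with the longest-str(v) selection.
import Mathlib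
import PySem

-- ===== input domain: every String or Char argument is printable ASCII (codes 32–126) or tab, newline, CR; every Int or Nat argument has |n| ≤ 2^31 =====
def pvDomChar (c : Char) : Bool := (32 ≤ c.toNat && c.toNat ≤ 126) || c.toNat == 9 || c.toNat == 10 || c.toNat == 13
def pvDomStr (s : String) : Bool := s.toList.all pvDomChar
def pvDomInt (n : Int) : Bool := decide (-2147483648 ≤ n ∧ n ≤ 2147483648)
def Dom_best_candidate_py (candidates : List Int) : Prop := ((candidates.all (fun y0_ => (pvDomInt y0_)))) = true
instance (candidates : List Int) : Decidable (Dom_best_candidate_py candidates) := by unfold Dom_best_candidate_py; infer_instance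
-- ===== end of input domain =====

-- B drops the Counter/most_common stable sort: it counts in one dict pass, takes the max of the
-- counts, and picks the winner in a single strict-improvement scan of the list (objective: simpler).


-- ===== PORT A =====
-- len(str(v)): PySem.Int.toChars v is str(v) as a char list, its length is len (exact)
def pvLenStr (v : Int) : Int := ((PySem.Int.toChars v).length : Int)

def best_candidate_py (candidates : List Int) : Option Int :=
  if candidates = [] then none
  else
    -- Counter(candidates).most_common() = sorted(counter.items(), key=itemgetter(1), reverse=True) (stable)
    let counts := PySem.List.sorted (PySem.Dict.counter candidates).items (fun p => p.2) true
    match PySem.List.pyGet? counts 0 with            -- counts[0]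
    | none => none                                   -- unreachable IndexError (counts nonempty here)
    | some p =>
      let top_count := p.2
      let tied := (counts.filter (fun q => q.2 == top_count)).map (fun q => q.1)
      PySem.List.max? tied pvLenStr                  -- max(tied, key=lambda v: len(str(v)))

-- ===== PORT B =====
def best_candidate_py_alt (candidates : List Int) : Option Int :=
  if candidates = [] then none
  else
    let counts := candidates.foldl (fun (d : PySem.Dict Int Int) x => d.insert x (d.getD x 0 + 1)) PySem.Dict.empty
    match PySem.List.max? counts.values (fun x => x) with   -- max(counts.values())
    | none => none                                          -- unreachable ValueError (counts nonempty here)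
    | some top =>
      (candidates.foldl
        (fun (st : Option Int × Int) v =>
          if counts.getD v 0 = top ∧ pvLenStr v > st.2 then (some v, pvLenStr v) else st)
        (none, -1)).1

-- ===== PRECONDITION & SPEC =====
def Spec_best_candidate_py (candidates : List Int) (out : Option Int) : Prop := out = best_candidate_py_alt candidates
instance (candidates : List Int) (out : Option Int) : Decidable (Spec_best_candidate_py candidates out) := by unfold Spec_best_candidate_py; infer_instance

-- ===== CLAIM (what is proved, stated in full; the proofs are below) =====
def Claim_equal_best_candidate_py : Prop := ∀ (candidates : List Int), Dom_best_candidate_py candidates → Spec_best_candidate_py candidates (best_candidate_py candidates)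

-- ===== LEMMAS AND PROOFS =====

-- Inserting an element of maximal key into a descending-sorted list appends it to the
-- maximal-key filter; an element of smaller key leaves that filter unchanged.
theorem pv_filter_insertBy_top (m : Int) (x : Int × Int) (s : List (Int × Int))
    (hs : s.Pairwise (fun a b => b.2 ≤ a.2)) (hxs : ∀ p ∈ s, p.2 ≤ m) (hx : x.2 ≤ m) :
    (PySem.List.insertBy (fun a b => decide (b.2 < a.2)) x s).filter (fun q => q.2 == m)
      = s.filter (fun q => q.2 == m) ++ (if x.2 = m then [x] else []) := by
  induction s with
  | nil =>
      by_cases h : x.2 = m <;>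
        simp [PySem.List.insertBy, h]
  | cons y ys ih =>
      rw [List.pairwise_cons] at hs
      obtain ⟨hy, hys⟩ := hs
      by_cases hlt : y.2 < x.2
      · have htail : (y :: ys).filter (fun q => q.2 == m) = [] := by
          rw [List.filter_eq_nil_iff]
          intro q hq
          rcases List.mem_cons.mp hq with rfl | hq'
          · simp; omega
          · have := hy q hq'; simp; omega
        have hins : PySem.List.insertBy (fun a b => decide (b.2 < a.2)) x (y :: ys)
            = x :: y :: ys := by
          simp [PySem.List.insertBy, hlt]
        rw [hins, List.filter_cons, htail]
        by_cases h : x.2 = m <;> simp [h]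
      · have hins : PySem.List.insertBy (fun a b => decide (b.2 < a.2)) x (y :: ys)
            = y :: PySem.List.insertBy (fun a b => decide (b.2 < a.2)) x ys := by
          simp [PySem.List.insertBy, hlt]
        rw [hins, List.filter_cons, List.filter_cons,
          ih hys (fun p hp => hxs p (List.mem_cons_of_mem _ hp))]
        by_cases h : y.2 = m <;> simp [h]

-- Stability of the reverse sort at the maximal key: filtering the top count out of
-- sorted(l, key=snd, reverse=True) yields the top-count entries of l in their original order.
theorem pv_filter_sorted_rev_top (l : List (Int × Int)) (m : Int)
    (hmax : ∀ p ∈ l, p.2 ≤ m) :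
    (PySem.List.sorted l (fun p => p.2) true).filter (fun q => q.2 == m)
      = l.filter (fun q => q.2 == m) := by
  induction l using List.reverseRecOn with
  | nil => simp [PySem.List.sorted]
  | append_singleton l x ih =>
      have hstep : PySem.List.sorted (l ++ [x]) (fun p => p.2) true
          = PySem.List.insertBy (fun a b => decide (b.2 < a.2)) x
              (PySem.List.sorted l (fun p => p.2) true) := by
        rw [PySem.List.sorted_rev_eq_foldl_insertBy, PySem.List.sorted_rev_eq_foldl_insertBy,
          List.foldl_append]
        rfl
      have hl : ∀ p ∈ l, p.2 ≤ m := fun p hp => hmax p (List.mem_append_left _ hp)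
      have hx : x.2 ≤ m := hmax x (by simp)
      have hp : (PySem.List.sorted l (fun p => p.2) true).Pairwise (fun a b => b.2 ≤ a.2) :=
        PySem.List.sorted_pairwise_rev l (fun p => p.2)
      have hmem : ∀ p ∈ PySem.List.sorted l (fun p => p.2) true, p.2 ≤ m := fun p hp' =>
        hl p ((PySem.List.sorted_perm l (fun p => p.2) true).mem_iff.mp hp')
      rw [hstep, pv_filter_insertBy_top m x _ hp hmem hx, ih hl, List.filter_append,
        List.filter_cons]
      by_cases h : x.2 = m <;> simp [h]

-- B's strict-improvement scan over the raw list computes the first maximum (by pvLenStr)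
-- over the deduped values satisfying p, paired with that maximum's length.
theorem pv_scan_eq_max? (p : Int → Prop) [DecidablePred p] (xs : List Int) :
    xs.foldl (fun (st : Option Int × Int) v => if p v ∧ pvLenStr v > st.2 then (some v, pvLenStr v) else st) (none, -1)
      = (match PySem.List.max? ((PySem.Set.ofList xs).filter (fun v => decide (p v))) pvLenStr with
         | none => (none, -1)
         | some m => (some m, pvLenStr m)) := by
  induction xs using List.reverseRecOn with
  | nil => simp [PySem.List.max?, PySem.Set.ofList]
  | append_singleton xs x ih =>
      rw [List.foldl_append, List.foldl_cons, List.foldl_nil, ih,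
        PySem.Set.ofList_append_singleton]
      by_cases hmem : x ∈ PySem.Set.ofList xs
      · rw [PySem.Set.add_of_mem hmem]
        by_cases hp : p x
        · -- x already tied; its length cannot strictly beat the running max
          have hxf : x ∈ (PySem.Set.ofList xs).filter (fun v => decide (p v)) :=
            List.mem_filter.mpr ⟨hmem, by simp [hp]⟩
          rcases hm : PySem.List.max? ((PySem.Set.ofList xs).filter (fun v => decide (p v))) pvLenStr with _ | m
          · exact absurd (List.ne_nil_of_mem hxf) (by simpa using ((PySem.List.max?_eq_none_iff _ _).mp hm))
          · have hle : pvLenStr x ≤ pvLenStr m := PySem.List.max?_isMax hm x hxf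
            simp [hp, not_lt.mpr hle]
        · simp [hp]
      · rw [PySem.Set.add_of_not_mem hmem, List.filter_append]
        by_cases hp : p x
        · have hfx : List.filter (fun v => decide (p v)) [x] = [x] := by simp [hp]
          rw [hfx]
          rcases hm : PySem.List.max? ((PySem.Set.ofList xs).filter (fun v => decide (p v))) pvLenStr with _ | m
          · have hnil : (PySem.Set.ofList xs).filter (fun v => decide (p v)) = [] := by
              simpa using ((PySem.List.max?_eq_none_iff _ _).mp hm)
            have hpos : (-1 : Int) < pvLenStr x := by
              have : (0:Int) ≤ pvLenStr x := Int.natCast_nonneg _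
              omega
            simp [hnil, hp, hpos, PySem.List.max?]
          · -- appended fresh tied element: max? of l ++ [x]
            have : PySem.List.max? ((PySem.Set.ofList xs).filter (fun v => decide (p v)) ++ [x]) pvLenStr
                = if pvLenStr m < pvLenStr x then some x else some m := by
              simp [PySem.List.max?, List.foldl_append] at hm ⊢
              rw [hm]
            rw [this]
            by_cases hlt : pvLenStr m < pvLenStr x <;> simp [hp, hlt]
        · simp [hp]

-- The two ports agree on every input.
theorem pv_eq (xs : List Int) : best_candidate_py xs = best_candidate_py_alt xs := by
  by_cases hnil : xs = []
  · simp [best_candidate_py, best_candidate_py_alt, hnil]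
  · obtain ⟨x0, hx0⟩ := List.exists_mem_of_ne_nil xs hnil
    rw [best_candidate_py, best_candidate_py_alt, if_neg hnil, if_neg hnil]
    set S := PySem.Set.ofList xs with hS
    set cnt : Int → Int := fun k => (xs.count k : Int) with hcnt
    set items := (PySem.Dict.counter xs).items with hitems
    have hitems' : items = S.map (fun k => (k, cnt k)) := PySem.Dict.items_counter xs
    -- B's dict
    set d := xs.foldl (fun (d : PySem.Dict Int Int) x => d.insert x (d.getD x 0 + 1)) PySem.Dict.empty with hd
    have hgetD : ∀ v, d.getD v 0 = cnt v := by
      intro v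
      rw [hd, PySem.Dict.getD_foldl_insert_add_one]
      simp [hcnt]
    have hkeys : d.keys = S := by
      rw [hd, PySem.Dict.keys_foldl_insert]
      simp [PySem.Dict.keys_empty, PySem.Set.update_nil_left, hS]
    have hnodup : d.keys.Nodup := by rw [hkeys]; exact PySem.Set.nodup_ofList xs
    have hvals : d.values = S.map cnt := by
      rw [PySem.Dict.values_eq_map_keys d hnodup 0, hkeys]
      exact List.map_congr_left (fun k _ => hgetD k)
    -- nonemptiness
    have hS0 : x0 ∈ S := by rw [hS]; exact (PySem.Set.mem_ofList xs x0).mpr hx0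
    have hSne : S ≠ [] := List.ne_nil_of_mem hS0
    have hitemsne : items ≠ [] := by
      rw [hitems']
      exact fun h => hSne (List.map_eq_nil_iff.mp h)
    -- sorted head
    rcases hsor : PySem.List.sorted items (fun p => p.2) true with _ | ⟨⟨v0, tA⟩, t⟩
    · exact absurd ((PySem.List.sorted_eq_nil_iff _ _ _).mp hsor) hitemsne
    · -- A's head entry is in items
      have hhead : ((v0, tA) : Int × Int) ∈ items := by
        have : ((v0, tA) : Int × Int) ∈ PySem.List.sorted items (fun p => p.2) true := by
          rw [hsor]; exact List.mem_cons_self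
        exact (PySem.List.sorted_perm items _ true).mem_iff.mp this
      have hmaxA : ∀ p ∈ items, p.2 ≤ tA := by
        intro p hp
        exact PySem.List.key_head_sorted_rev_ge items (fun p => p.2) hsor p hp
      -- B's max of values
      have hvalsne : d.values ≠ [] := by
        rw [hvals]
        exact fun h => hSne (List.map_eq_nil_iff.mp h)
      rcases hmB : PySem.List.max? d.values (fun x => x) with _ | tB
      · exact absurd ((PySem.List.max?_eq_none_iff _ _).mp hmB) hvalsne
      · -- tA = tB
        have htAmem : tA ∈ d.values := by
          rw [hvals]
          rw [hitems'] at hhead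
          obtain ⟨k, hk, hkeq⟩ := List.mem_map.mp hhead
          exact List.mem_map.mpr ⟨k, hk, by simpa using congrArg Prod.snd hkeq⟩
        have htALe : tA ≤ tB := PySem.List.max?_isMax hmB tA htAmem
        have htBLe : tB ≤ tA := by
          have := PySem.List.max?_mem hmB
          rw [hvals] at this
          obtain ⟨k, hk, hkeq⟩ := List.mem_map.mp this
          have : (k, cnt k) ∈ items := by
            rw [hitems']; exact List.mem_map.mpr ⟨k, hk, rfl⟩
          have := hmaxA _ this
          simpa [hkeq] using this
        have hT : tB = tA := le_antisymm htBLe htALe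
        subst hT
        -- A's tied list
        have hg : PySem.List.pyGet? (((v0, tB) : Int × Int) :: t) 0 = some (v0, tB) := by
          simp [PySem.List.pyGet?, PySem.List.pyIdx?]
        simp only [hg, hmB]
        have hfilt : ((v0, tB) :: t).filter (fun q => q.2 == tB)
            = items.filter (fun q => q.2 == tB) := by
          rw [← hsor]; exact pv_filter_sorted_rev_top items tB hmaxA
        rw [hfilt, hitems', List.filter_map, List.map_map]
        rw [pv_scan_eq_max? (fun v => d.getD v 0 = tB) xs]
        have hpred : (PySem.Set.ofList xs).filter (fun v => decide (d.getD v 0 = tB))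
            = S.filter ((fun q => q.2 == tB) ∘ fun k => (k, cnt k)) := by
          rw [← hS]
          apply List.filter_congr
          intro v _
          rw [Function.comp_apply, hgetD v]
          by_cases h : cnt v = tB <;> simp [h]
        rw [hpred]
        have hmapid : List.map ((fun q : Int × Int => q.1) ∘ fun k => (k, cnt k))
            (S.filter ((fun q => q.2 == tB) ∘ fun k => (k, cnt k)))
            = S.filter ((fun q => q.2 == tB) ∘ fun k => (k, cnt k)) := by
          simp [Function.comp_def]
        rw [hmapid]
        rcases hmax : PySem.List.max? (S.filter ((fun q => q.2 == tB) ∘ fun k => (k, cnt k))) pvLenStr with _ | m <;>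
          rw [hmax]

-- ===== VERDICT (by name: the statement is the Claim_ definition above) =====
theorem best_candidate_py_spec : Claim_equal_best_candidate_py := by
  intro candidates _
  unfold Spec_best_candidate_py
  exact pv_eq candidates
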